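-- pv_equiv track=rewrite | github.com/minecraftmuselk/Math | ProjectEuler/Probs 41-60/problem_46.py | is_goldbach_exception
-- ===== SOURCE A (Python) =====
-- import math
--
-- def is_goldbach_exception(n, primes):
--     for prime in primes:
--         if prime >= n:
--             break
--         remainder = n - prime
--         if remainder % 2 == 0:
--             square = remainder // 2
--             if math.isqrt(square) ** 2 == square:
--                 return False
--     return True
-- ===== SOURCE B (Python) =====
-- import itertools
-- import math
--
--
-- def is_goldbach_exception(n, primes):
--     # Candidates A would consider: the prefix of primes before the first one >= n.
--     cand = set(itertools.takewhile(lambda p: p < n, primes))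
--     if not cand:
--         return True
--     m = n - min(cand)
--     # n is decomposable iff n - 2*k*k is a candidate for some k >= 1 with 2*k*k <= m.
--     return all(n - 2 * k * k not in cand for k in range(1, math.isqrt(m // 2) + 1))
-- ===== Notes on version B (the rewrite author's own statement) =====
-- stated objective: alternative
-- what changed: Instead of scanning each candidate prime below n and testing whether n-p is twice a perfect square, B builds a set of the candidate primes once and iterates over the values 2*k*k up to n-min(candidates), testing membership of n-2*k*k in the set.
import Mathlib
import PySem

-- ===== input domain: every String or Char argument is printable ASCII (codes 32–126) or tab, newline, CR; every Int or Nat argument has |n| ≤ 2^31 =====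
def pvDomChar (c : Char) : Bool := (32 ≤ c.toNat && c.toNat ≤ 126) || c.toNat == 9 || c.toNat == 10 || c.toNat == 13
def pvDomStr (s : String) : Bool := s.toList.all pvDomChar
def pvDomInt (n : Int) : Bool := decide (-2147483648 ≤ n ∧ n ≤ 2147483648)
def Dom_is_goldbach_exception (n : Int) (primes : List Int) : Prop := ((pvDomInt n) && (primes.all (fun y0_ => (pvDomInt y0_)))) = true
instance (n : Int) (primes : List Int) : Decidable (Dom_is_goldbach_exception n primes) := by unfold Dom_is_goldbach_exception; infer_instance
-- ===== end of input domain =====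

-- B replaces A's scan over the candidate primes by a scan over the values 2*k*k,
-- testing set membership of n-2k*k among the primes A would consider (objective: alternative algorithm).

-- ===== PORT A =====
-- the for-loop with break/early return, as structural recursion over the list
def pvLoopA (n : Int) : List Int → Bool
  | [] => true
  | p :: ps =>
    if n ≤ p then true            -- 'if prime >= n: break'
    else
      let r := n - p
      if PySem.Int.mod r 2 = 0 then
        let square := PySem.Int.floordiv r 2
        -- math.isqrt ported by hand as Nat.sqrt; exact here since square ≥ 0 (p < n on this branch)
        if ((Nat.sqrt square.toNat : Int)) ^ 2 = square then false
        else pvLoopA n ps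
      else pvLoopA n ps

def is_goldbach_exception (n : Int) (primes : List Int) : Bool := pvLoopA n primes

-- ===== PORT B =====
def is_goldbach_exception_alt (n : Int) (primes : List Int) : Bool :=
  let cand : PySem.Set Int := PySem.Set.ofList (primes.takeWhile (fun p => decide (p < n)))
  match PySem.List.min? cand (fun x => x) with
  | none => true                  -- 'if not cand: return True'
  | some mn =>
    let m := n - mn
    -- math.isqrt ported by hand as Nat.sqrt; exact here since m // 2 ≥ 0 (mn < n)
    (PySem.List.pyRange 1 (((Nat.sqrt (PySem.Int.floordiv m 2).toNat : Int)) + 1) 1).all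
      (fun k => !(PySem.Set.contains cand (n - 2 * k * k)))

-- ===== PRECONDITION & SPEC =====
def Spec_is_goldbach_exception (n : Int) (primes : List Int) (out : Bool) : Prop := out = is_goldbach_exception_alt n primes
instance (n : Int) (primes : List Int) (out : Bool) : Decidable (Spec_is_goldbach_exception n primes out) := by unfold Spec_is_goldbach_exception; infer_instance

-- ===== CLAIM (what is proved, stated in full; the proofs are below) =====
def Claim_equal_is_goldbach_exception : Prop := ∀ (n : Int) (primes : List Int), Dom_is_goldbach_exception n primes → Spec_is_goldbach_exception n primes (is_goldbach_exception n primes)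

-- ===== LEMMAS AND PROOFS =====

-- the body test of A's loop, as a predicate on the prime
def pvCond (n p : Int) : Bool :=
  decide (PySem.Int.mod (n - p) 2 = 0) &&
    decide (((Nat.sqrt (PySem.Int.floordiv (n - p) 2).toNat : Int)) ^ 2 = PySem.Int.floordiv (n - p) 2)

theorem pvLoopA_cons_lt (n p : Int) (ps : List Int) (h : ¬ n ≤ p) :
    pvLoopA n (p :: ps) = (!pvCond n p && pvLoopA n ps) := by
  conv_lhs => rw [pvLoopA]
  rw [if_neg h]
  unfold pvCond
  by_cases h2 : PySem.Int.mod (n - p) 2 = 0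
  · rw [if_pos h2]
    by_cases h3 : ((Nat.sqrt (PySem.Int.floordiv (n - p) 2).toNat : Int)) ^ 2 = PySem.Int.floordiv (n - p) 2
    · rw [if_pos h3]
      simp only [decide_eq_true h2, decide_eq_true h3, Bool.and_self, Bool.not_true,
        Bool.false_and]
    · rw [if_neg h3]
      simp only [decide_eq_false h3, Bool.and_false, Bool.not_false, Bool.true_and]
  · rw [if_neg h2]
    simp only [decide_eq_false h2, Bool.false_and, Bool.not_false, Bool.true_and]

theorem pvLoopA_eq_all (n : Int) (l : List Int) :
    pvLoopA n l = (l.takeWhile (fun p => decide (p < n))).all (fun p => !pvCond n p) := by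
  induction l with
  | nil => rfl
  | cons p ps ih =>
    by_cases h : n ≤ p
    · simp [pvLoopA, h, List.takeWhile, show ¬ p < n by omega]
    · rw [pvLoopA_cons_lt n p ps h, ih]
      simp [show p < n by omega]

-- characterisation of A's test: for p < n it says n - p = 2*k*k for some k >= 1
theorem pvCond_iff (n p : Int) (hp : p < n) :
    pvCond n p = true ↔ ∃ k : Int, 1 ≤ k ∧ n - p = 2 * k * k := by
  have hr : 0 < n - p := by omega
  have hfd : PySem.Int.floordiv (n - p) 2 = (n - p) / 2 :=
    PySem.Int.floordiv_eq_ediv_of_pos (by norm_num)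
  constructor
  · intro hc
    have h1 : PySem.Int.mod (n - p) 2 = 0 := by
      have := (Bool.and_eq_true ..).mp hc |>.1
      exact of_decide_eq_true this
    have h2 : ((Nat.sqrt (PySem.Int.floordiv (n - p) 2).toNat : Int)) ^ 2
        = PySem.Int.floordiv (n - p) 2 := by
      have := (Bool.and_eq_true ..).mp hc |>.2
      exact of_decide_eq_true this
    obtain ⟨c, hcdef⟩ := (PySem.Int.mod_eq_zero_iff_dvd (n - p) 2).mp h1
    have hdiv : (n - p) / 2 = c := by rw [hcdef]; exact Int.mul_ediv_cancel_left c (by norm_num)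
    refine ⟨((Nat.sqrt ((n - p) / 2).toNat : Int)), ?_, ?_⟩
    · rw [hfd] at h2
      have hc1 : 1 ≤ c := by omega
      nlinarith [h2]
    · rw [hfd] at h2
      nlinarith [h2]
  · rintro ⟨k, hk1, hkr⟩
    have hkk : (n - p) / 2 = k * k := by
      rw [show n - p = 2 * (k * k) by linarith]
      exact Int.mul_ediv_cancel_left _ (by norm_num)
    have hmod : PySem.Int.mod (n - p) 2 = 0 :=
      (PySem.Int.mod_eq_zero_iff_dvd (n - p) 2).mpr ⟨k * k, by linarith⟩
    have hknn : k = ((k.toNat : Int)) := (Int.toNat_of_nonneg (by omega)).symm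
    have hsq : ((Nat.sqrt (PySem.Int.floordiv (n - p) 2).toNat : Int)) ^ 2
        = PySem.Int.floordiv (n - p) 2 := by
      rw [hfd, hkk, hknn]
      have h1 : ((k.toNat : Int) * (k.toNat : Int)).toNat = k.toNat * k.toNat := by
        exact_mod_cast Int.toNat_natCast (k.toNat * k.toNat)
      rw [h1, ← pow_two k.toNat, Nat.sqrt_eq']
      ring
    unfold pvCond
    rw [decide_eq_true hmod, decide_eq_true hsq, Bool.and_self]

theorem main_eq (n : Int) (primes : List Int) :
    is_goldbach_exception n primes = is_goldbach_exception_alt n primes := by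
  have halt : is_goldbach_exception_alt n primes =
      (match PySem.List.min? (PySem.Set.ofList (primes.takeWhile (fun p => decide (p < n)))) (fun x => x) with
       | none => true
       | some mn =>
         (PySem.List.pyRange 1 (((Nat.sqrt (PySem.Int.floordiv (n - mn) 2).toNat : Int)) + 1) 1).all
           (fun k => !(PySem.Set.contains (PySem.Set.ofList (primes.takeWhile (fun p => decide (p < n)))) (n - 2 * k * k)))) := rfl
  rw [halt]
  unfold is_goldbach_exception
  rw [pvLoopA_eq_all]
  set pre := primes.takeWhile (fun p => decide (p < n)) with hpre
  set cand := PySem.Set.ofList pre with hcand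
  have hmemc : ∀ x : Int, x ∈ cand ↔ x ∈ pre := fun x => PySem.Set.mem_ofList pre x
  have hltn : ∀ x : Int, x ∈ pre → x < n := by
    intro x hx
    have := List.mem_takeWhile_imp hx
    simpa using this
  cases hmin : PySem.List.min? cand (fun x => x) with
  | none =>
    have hc : cand = [] := (PySem.List.min?_eq_none_iff cand (fun x => x)).mp hmin
    have hp : pre = [] := by
      rcases hpp : pre with _ | ⟨a, t⟩
      · rfl
      · exact absurd ((hmemc a).mpr (by rw [hpp]; simp)) (by simp [hc])
    simp [hp]
  | some mn =>
    have hmnmem : mn ∈ cand := PySem.List.min?_mem hmin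
    have hmnmin : ∀ y ∈ cand, mn ≤ y := PySem.List.min?_isMin hmin
    have hmnlt : mn < n := hltn mn ((hmemc mn).mp hmnmem)
    have hm2 : PySem.Int.floordiv (n - mn) 2 = (n - mn) / 2 :=
      PySem.Int.floordiv_eq_ediv_of_pos (by norm_num)
    rw [Bool.eq_iff_iff]
    simp only [List.all_eq_true]
    constructor
    · intro hA k hk
      rw [PySem.List.mem_pyRange_one] at hk
      have hnot : n - 2 * k * k ∉ cand := by
        intro hmem
        have hp' := (hmemc _).mp hmem
        have hcnd := (pvCond_iff n (n - 2 * k * k) (hltn _ hp')).mpr ⟨k, hk.1, by ring⟩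
        have := hA _ hp'
        simp [hcnd] at this
      simp [hnot]
    · intro hB p hp
      rw [Bool.not_eq_true']
      cases hpc : pvCond n p with
      | false => rfl
      | true =>
        exfalso
        obtain ⟨k, hk1, hkr⟩ := (pvCond_iff n p (hltn p hp)).mp hpc
        have hple : mn ≤ p := hmnmin p ((hmemc p).mpr hp)
        have hkk2 : k * k ≤ (n - mn) / 2 := by
          rw [Int.le_ediv_iff_mul_le (by norm_num : (0:Int) < 2)]
          linarith
        have hknn : k = ((k.toNat : Int)) := (Int.toNat_of_nonneg (by omega)).symm
        have hcast : ((k.toNat * k.toNat : Nat) : Int) = k * k := by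
          push_cast
          rw [← hknn]
        have hnat : k.toNat * k.toNat ≤ ((n - mn) / 2).toNat := by
          have h := Int.toNat_le_toNat hkk2
          rwa [← hcast, Int.toNat_natCast] at h
        have hks : k.toNat ≤ Nat.sqrt ((n - mn) / 2).toNat := Nat.le_sqrt.mpr hnat
        have hklt : k < ((Nat.sqrt (PySem.Int.floordiv (n - mn) 2).toNat : Int)) + 1 := by
          rw [hm2]
          omega
        have hkmem : k ∈ PySem.List.pyRange 1
            (((Nat.sqrt (PySem.Int.floordiv (n - mn) 2).toNat : Int)) + 1) 1 :=
          (PySem.List.mem_pyRange_one).mpr ⟨hk1, hklt⟩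
        have hall := hB k hkmem
        have hmem : n - 2 * k * k ∈ cand := (hmemc _).mpr (by
          rw [show n - 2 * k * k = p by linarith]
          exact hp)
        simp [hmem] at hall

-- ===== VERDICT (by name: the statement is the Claim_ definition above) =====
theorem is_goldbach_exception_spec : Claim_equal_is_goldbach_exception := by
  intro n primes _
  unfold Spec_is_goldbach_exception
  exact main_eq n primes
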